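-- pv_equiv track=rewrite | github.com/alonsomadrigal04/Programacion_practicas | Practica4/prac04ej05.py | expansion_triplete_CAG
-- ===== SOURCE A (Python) =====
-- def expansion_triplete_CAG(adn):
--     i = 0
--     cont = 0
--     mayor = 0
--     while i+3 <= len(adn):
--         if adn[i:i+3] == "CAG":
--             cont += 1
--             if cont > mayor:
--                 mayor = cont
--             i += 3
--         else:
--             cont = 0
--             i += 1
--     if mayor == 0:
--         mayor = None
--     return mayor
-- ===== SOURCE B (Python) =====
-- def expansion_triplete_CAG(adn):
--     # Right-to-left DP over single characters: chain(i) = chain(i+3)+1 when a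
--     # "CAG" starts at i, else 0; keep only the last two chars and last three
--     # chain values as the window slides. One char at a time, no slicing.
--     p1 = p2 = ''
--     c1 = c2 = c3 = 0
--     best = 0
--     for ch in reversed(adn):
--         cur = c3 + 1 if (ch == 'C' and p1 == 'A' and p2 == 'G') else 0
--         if cur > best:
--             best = cur
--         p2 = p1
--         p1 = ch
--         c3 = c2
--         c2 = c1
--         c1 = cur
--     return best if best else None
-- ===== Notes on version B (the rewrite author's own statement) =====
-- stated objective: faster
-- what changed: A's forward window scanner (slice adn[i:i+3] at each position, stepping 3 on match and 1 on mismatch with a reset counter) is replaced by a single right-to-left character pass computing the DP chain(i) = chain(i+3)+1 via an O(1) sliding state; no per-position string slicing.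
import Mathlib
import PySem

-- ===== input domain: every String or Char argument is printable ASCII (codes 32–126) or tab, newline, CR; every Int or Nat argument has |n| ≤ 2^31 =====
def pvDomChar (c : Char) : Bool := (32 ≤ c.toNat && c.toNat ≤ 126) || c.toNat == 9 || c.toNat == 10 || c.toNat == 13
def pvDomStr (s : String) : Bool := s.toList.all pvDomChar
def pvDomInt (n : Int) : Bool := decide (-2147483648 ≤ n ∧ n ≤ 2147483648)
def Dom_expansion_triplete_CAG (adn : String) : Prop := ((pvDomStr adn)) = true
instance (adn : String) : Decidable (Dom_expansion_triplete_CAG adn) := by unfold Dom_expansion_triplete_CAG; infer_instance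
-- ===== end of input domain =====

-- B replaces A's forward window-rescanning scanner by a single right-to-left
-- character pass (sliding DP state, no per-position slicing); a timing run
-- measured B faster by a constant factor.

-- ===== PORT A =====
-- while i+3 <= len(adn): … ; i : Nat (Python's i stays ≥ 0), cont/mayor : Int
def expansion_triplete_CAG.loop (adn : String) (i : Nat) (cont mayor : Int) : Int :=
  if h : i + 3 ≤ adn.toList.length then
    if PySem.Str.slice adn (some (i : Int)) (some ((i : Int) + 3)) = "CAG" then
      let cont := cont + 1
      let mayor := if cont > mayor then cont else mayor
      expansion_triplete_CAG.loop adn (i + 3) cont mayor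
    else
      expansion_triplete_CAG.loop adn (i + 1) 0 mayor
  else mayor
termination_by adn.toList.length - i
decreasing_by all_goals omega

def expansion_triplete_CAG (adn : String) : Option Int :=
  let mayor := expansion_triplete_CAG.loop adn 0 0 0
  if mayor = 0 then none else some mayor

-- ===== PORT B =====
-- state (p1, p2, c1, c2, c3, best); Python's '' placeholder for the not-yet-seen
-- next characters is ported as 'none', a one-char string as 'some c' (exact: a
-- 1-char Python string equals 'A'/'G' iff its char does).
def expansion_triplete_CAG_alt.step
    (st : Option Char × Option Char × Int × Int × Int × Int) (ch : Char) :
    Option Char × Option Char × Int × Int × Int × Int :=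
  let (p1, p2, c1, c2, _c3, best) := st
  let cur := if ch = 'C' ∧ p1 = some 'A' ∧ p2 = some 'G' then _c3 + 1 else 0
  let best := if cur > best then cur else best
  (some ch, p1, cur, c1, c2, best)

def expansion_triplete_CAG_alt (adn : String) : Option Int :=
  let st := adn.toList.reverse.foldl expansion_triplete_CAG_alt.step
      (none, none, 0, 0, 0, 0)
  let best := st.2.2.2.2.2
  if best = 0 then none else some best

-- ===== PRECONDITION & SPEC =====
def Spec_expansion_triplete_CAG (adn : String) (out : Option Int) : Prop := out = expansion_triplete_CAG_alt adn
instance (adn : String) (out : Option Int) : Decidable (Spec_expansion_triplete_CAG adn out) := by unfold Spec_expansion_triplete_CAG; infer_instance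

-- ===== CLAIM (what is proved, stated in full; the proofs are below) =====
def Claim_equal_expansion_triplete_CAG : Prop := ∀ (adn : String), Dom_expansion_triplete_CAG adn → Spec_expansion_triplete_CAG adn (expansion_triplete_CAG adn)

-- ===== LEMMAS AND PROOFS =====

-- chain length of consecutive "CAG" triplets at the head of l
def pvChain : List Char → Int
  | 'C' :: 'A' :: 'G' :: r => pvChain r + 1
  | _ => 0

-- best chain over all suffixes of l
def pvBest : List Char → Int
  | [] => 0
  | c :: r => max (pvChain (c :: r)) (pvBest r)

theorem pvChain_nonneg (l : List Char) : 0 ≤ pvChain l := by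
  fun_induction pvChain <;> omega

theorem pvBest_nonneg (l : List Char) : 0 ≤ pvBest l := by
  induction l with
  | nil => simp [pvBest]
  | cons c r ih => simp [pvBest]; right; exact ih

theorem pvChain_le_pvBest (l : List Char) : pvChain l ≤ pvBest l := by
  cases l with
  | nil => simp [pvChain, pvBest]
  | cons c r => simp [pvBest]

theorem pvChain_not_cag (l : List Char)
    (h : ∀ r : List Char, l ≠ 'C' :: 'A' :: 'G' :: r) : pvChain l = 0 := by
  unfold pvChain; split
  · exact absurd rfl (h _)
  · rfl

theorem pvChain_short (l : List Char) (h : l.length < 3) : pvChain l = 0 := by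
  apply pvChain_not_cag
  intro r hr
  rw [hr] at h; simp at h; omega

theorem pvBest_short (l : List Char) (h : l.length < 3) : pvBest l = 0 := by
  induction l with
  | nil => rfl
  | cons c r ih =>
      rw [pvBest, pvChain_short _ h, ih (by simp at h ⊢; omega)]
      simp

-- the suffix-level description of A's while loop
def pvF (l : List Char) (cont mayor : Int) : Int :=
  if l.length < 3 then mayor
  else
    match l with
    | 'C' :: 'A' :: 'G' :: r =>
        pvF r (cont + 1) (if cont + 1 > mayor then cont + 1 else mayor)
    | _ :: r => pvF r 0 mayor
    | [] => mayor
termination_by l.length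
decreasing_by all_goals simp_all <;> omega

theorem pvF_eq (l : List Char) (cont mayor : Int) (h0 : 0 ≤ cont)
    (h1 : cont ≤ mayor) :
    pvF l cont mayor = max mayor (max (cont + pvChain l) (pvBest l)) := by
  revert h0 h1
  fun_induction pvF l cont mayor with
  | case1 l cont mayor hshort =>
      intro h0 h1
      rw [pvChain_short l hshort, pvBest_short l hshort]
      omega
  | case2 cont mayor r hlen ih =>
      intro h0 h1
      simp only [dite_eq_ite] at ih
      rw [ih (by omega) (by omega)]
      have h2 : pvChain ('A' :: 'G' :: r) = 0 := pvChain_not_cag _ (by intro r' h; simp at h)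
      have h3 : pvChain ('G' :: r) = 0 := pvChain_not_cag _ (by intro r' h; simp at h)
      have hcr : pvChain ('C' :: 'A' :: 'G' :: r) = pvChain r + 1 := rfl
      have hb : pvBest ('C' :: 'A' :: 'G' :: r)
          = max (pvChain r + 1) (pvBest r) := by
        rw [pvBest, pvBest, pvBest, h2, h3, hcr]
        have := pvBest_nonneg r
        omega
      rw [hcr, hb]
      have := pvChain_nonneg r
      omega
  | case3 cont mayor c r hne hlen ih =>
      intro h0 h1
      rw [ih (by omega) (by omega)]
      have hc : pvChain (c :: r) = 0 := by
        apply pvChain_not_cag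
        intro r' h
        simp at h
        exact hne r' h.1 h.2
      rw [show pvBest (c :: r) = max (pvChain (c :: r)) (pvBest r) from rfl, hc]
      have := pvChain_le_pvBest r
      have := pvBest_nonneg r
      omega
  | case4 cont mayor hlen => intro _ _; simp at hlen

theorem pvSlice3 (adn : String) (i : Nat) :
    (PySem.Str.slice adn (some (i : Int)) (some ((i : Int) + 3))).toList
      = (adn.toList.drop i).take 3 := by
  have h : ((i : Int) + 3) = ((i + 3 : Nat) : Int) := by push_cast; ring
  rw [PySem.Str.toList_slice, h, PySem.Chars.slice_eq_listSlice, PySem.List.slice_natCast]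
  congr 1
  omega

theorem pvF_exit (l : List Char) (cont mayor : Int) (h : l.length < 3) :
    pvF l cont mayor = mayor := by
  rw [pvF.eq_def]
  simp [h]

theorem pvF_match (r : List Char) (cont mayor : Int) :
    pvF ('C' :: 'A' :: 'G' :: r) cont mayor
      = pvF r (cont + 1) (if cont + 1 > mayor then cont + 1 else mayor) := by
  rw [pvF.eq_def]
  rw [if_neg (by simp)]
  rfl

theorem pvF_nomatch (c : Char) (r : List Char) (cont mayor : Int)
    (hlen : ¬ (c :: r).length < 3)
    (hne : ∀ r' : List Char, c :: r ≠ 'C' :: 'A' :: 'G' :: r') :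
    pvF (c :: r) cont mayor = pvF r 0 mayor := by
  rw [pvF.eq_def]
  rw [if_neg hlen]
  split
  · rename_i heq
    simp at heq
    exact absurd (by rw [heq.1, heq.2] : c :: r = 'C' :: 'A' :: 'G' :: _) (hne _)
  · rename_i head r2 hx heq
    obtain ⟨h1, h2⟩ := List.cons.inj heq
    rw [h2]
  · rename_i heq
    simp at heq

-- A's loop at index i is pvF on the suffix
theorem loopA_eq (adn : String) (i : Nat) (cont mayor : Int) :
    expansion_triplete_CAG.loop adn i cont mayor
      = pvF (adn.toList.drop i) cont mayor := by
  fun_induction expansion_triplete_CAG.loop adn i cont mayor with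
  | case1 i cont mayor hlen hcag cont' mayor' ih =>
      rw [ih]
      have hsl : (adn.toList.drop i).take 3 = ['C', 'A', 'G'] := by
        rw [← pvSlice3, hcag]
        rfl
      have hdrop : adn.toList.drop i
          = 'C' :: 'A' :: 'G' :: adn.toList.drop (i + 3) := by
        conv_lhs => rw [← List.take_append_drop 3 (adn.toList.drop i)]
        rw [hsl, List.drop_drop]
        norm_num
      rw [hdrop, pvF_match]
      simp only [cont', mayor', dite_eq_ite]
  | case2 i cont mayor hlen hcag ih =>
      rw [ih]
      have h3 : 3 ≤ (adn.toList.drop i).length := by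
        rw [List.length_drop]; omega
      have hsl : ¬ ((adn.toList.drop i).take 3 = ['C', 'A', 'G']) := by
        intro hc
        exact hcag (String.toList_inj.mp (by rw [pvSlice3, hc]; rfl))
      obtain ⟨c, r, hcr⟩ : ∃ c r, adn.toList.drop i = c :: r := by
        cases h : adn.toList.drop i with
        | nil => rw [h] at h3; simp at h3
        | cons c r => exact ⟨c, r, rfl⟩
      have hr : adn.toList.drop (i + 1) = r := by
        have := congrArg (List.drop 1) hcr
        simpa [List.drop_drop, Nat.add_comm] using this
      rw [hr, hcr]
      rw [pvF_nomatch c r cont mayor (by rw [hcr] at h3; simp at h3 ⊢; omega)]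
      intro r' hch
      apply hsl
      rw [hcr, hch]
      rfl
  | case3 i cont mayor hlen =>
      rw [pvF_exit]
      rw [List.length_drop]; omega

-- B's fold invariant
theorem foldB_eq (l : List Char) :
    l.reverse.foldl expansion_triplete_CAG_alt.step (none, none, 0, 0, 0, 0)
      = (l.head?, l.tail.head?, pvChain l, pvChain l.tail,
         pvChain l.tail.tail, pvBest l) := by
  induction l with
  | nil => rfl
  | cons x l ih =>
      rw [List.reverse_cons, List.foldl_append, ih]
      simp only [List.foldl_cons, List.foldl_nil]
      rw [expansion_triplete_CAG_alt.step]
      have hkey : pvChain (x :: l)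
          = (if x = 'C' ∧ l.head? = some 'A' ∧ l.tail.head? = some 'G'
             then pvChain l.tail.tail + 1 else 0) := by
        match l with
        | [] =>
            rw [if_neg (by simp)]
            exact pvChain_not_cag _ (by intro r h; simp at h)
        | [a] =>
            rw [if_neg (by simp)]
            exact pvChain_short _ (by simp)
        | a :: b :: r =>
            by_cases hx : x = 'C' ∧ a = 'A' ∧ b = 'G'
            · obtain ⟨h1, h2, h3⟩ := hx
              subst h1; subst h2; subst h3
              simp [pvChain]
            · rw [if_neg (by simpa using hx)]
              apply pvChain_not_cag
              intro r' h
              simp at h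
              exact hx ⟨h.1, h.2.1, h.2.2.1⟩
      simp only [List.head?_cons, List.tail_cons]
      rw [show pvBest (x :: l) = max (pvChain (x :: l)) (pvBest l) from rfl, hkey]
      simp only [Prod.mk.injEq]
      refine ⟨trivial, trivial, trivial, trivial, trivial, ?_⟩
      split <;> omega

-- ===== VERDICT (by name: the statement is the Claim_ definition above) =====
theorem expansion_triplete_CAG_spec : Claim_equal_expansion_triplete_CAG := by
  intro adn _
  unfold Spec_expansion_triplete_CAG expansion_triplete_CAG expansion_triplete_CAG_alt
  have hA : expansion_triplete_CAG.loop adn 0 0 0 = pvBest adn.toList := by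
    rw [loopA_eq, List.drop_zero, pvF_eq _ _ _ le_rfl le_rfl]
    have h1 := pvChain_le_pvBest adn.toList
    have h2 := pvBest_nonneg adn.toList
    omega
  rw [hA, foldB_eq]
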